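-- pv_equiv track=rewrite | github.com/karpinsk/ASD | Graph algoritms/Adjacency matrix implementations/bfs.py | BFS
-- ===== SOURCE A (Python) =====
-- from queue import PriorityQueue
--
-- def BFS(G, s):
--     V = len(G)
--     Q = PriorityQueue()
--     result = [(0, 0)] * V  # tablica wynikowa (parent i,di)
--
--     visited = [False] * V  # tworzymy tablicę odwiedzonych wierzchołków i ustawiamy ich wartości na false
--
--     result[s] = (None, 0)  # deklarujemy wartości dla wywoływanego wierzchołka
--     visited[s] = True
--     Q.put(s)
--
--     while not Q.empty():
--         u = Q.get()
--         for v in range(V):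
--             if G[u][v] == 1:
--                 if not visited[v]:
--                     visited[v] = True
--                     result[v] = (u, result[u][1] + 1)
--                     Q.put(v)
--     return result
-- ===== SOURCE B (Python) =====
-- def BFS(G, s):
--     V = len(G)
--     result = [(0, 0)] * V
--     visited = [False] * V
--     result[s] = (None, 0)
--     visited[s] = True
--     frontier = [s]
--     while frontier:
--         u = min(frontier)
--         frontier.remove(u)
--         row = G[u]
--         new = [v for v in range(V) if row[v] == 1 and not visited[v]]
--         d = result[u][1] + 1
--         for v in new:
--             visited[v] = True
--             result[v] = (u, d)
--         frontier += new
--     return result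
-- ===== Notes on version B (the rewrite author's own statement) =====
-- stated objective: simpler
-- what changed: Replaces the PriorityQueue with a plain frontier list extracted by a min-scan, and replaces the per-neighbour sequential discovery with a one-shot comprehension that collects all newly discovered neighbours and then updates visited/result/frontier in batch.
-- outside the precondition, e.g. on BFS([[0, 0], [0]], 0): A returns [(None, 0), (0, 0)], B returns [(None, 0), (0, 0)]
import Mathlib
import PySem

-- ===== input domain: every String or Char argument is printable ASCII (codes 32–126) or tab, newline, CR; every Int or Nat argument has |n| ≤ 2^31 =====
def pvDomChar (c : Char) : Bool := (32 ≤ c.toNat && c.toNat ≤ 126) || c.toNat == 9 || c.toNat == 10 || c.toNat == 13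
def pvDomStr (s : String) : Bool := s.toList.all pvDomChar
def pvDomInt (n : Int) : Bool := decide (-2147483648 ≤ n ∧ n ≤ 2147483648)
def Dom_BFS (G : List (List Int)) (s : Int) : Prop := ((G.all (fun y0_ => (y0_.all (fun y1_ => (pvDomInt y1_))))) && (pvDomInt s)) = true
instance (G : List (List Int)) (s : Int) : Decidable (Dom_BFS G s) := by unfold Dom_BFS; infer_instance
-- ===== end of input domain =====

-- B replaces A's PriorityQueue by a plain frontier list with a min-scan and discovers each
-- processed vertex's new neighbours in one batch (comprehension) instead of one at a time;
-- objective: simpler (no heap, no per-neighbour queue surgery). Return values only; no argument is mutated.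

-- ===== PORT A =====
-- A's PriorityQueue of (distinct) vertex indices is transliterated as a sorted list:
-- Q.put = ordered insert, Q.get = take the head (the minimum), Q.empty = the list is [].
def bfsStepA (row : List Int) (u : Int)
    (st : List Bool × List (Option Int × Int) × List Int) (v : Nat) :
    List Bool × List (Option Int × Int) × List Int :=
  if PySem.List.pyGetD row (v : Int) 0 = 1 then
    if PySem.List.pyGetD st.1 (v : Int) false = false then
      (PySem.List.pySetD st.1 (v : Int) true,
       PySem.List.pySetD st.2.1 (v : Int)
         ((some u : Option Int), (PySem.List.pyGetD st.2.1 u (none, 0)).2 + 1),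
       List.orderedInsert (· ≤ ·) (v : Int) st.2.2)
    else st
  else st

def bfsLoopA (G : List (List Int)) (V : Nat) :
    Nat → List Bool × List (Option Int × Int) × List Int → List (Option Int × Int)
  | 0, st => st.2.1
  | f + 1, (vis, res, q) =>
    match q with
    | [] => res
    | u :: q' =>
        bfsLoopA G V f
          ((List.range V).foldl (bfsStepA (PySem.List.pyGetD G u []) u) (vis, res, q'))

def BFS (G : List (List Int)) (s : Int) : List (Option Int × Int) :=
  let V := G.length
  let result := PySem.List.pySetD (List.replicate V ((some 0 : Option Int), (0 : Int))) s (none, 0)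
  let visited := PySem.List.pySetD (List.replicate V false) s true
  bfsLoopA G V (V + 1) (visited, result, [s])

-- ===== PORT B =====
def bfsLoopB (G : List (List Int)) (V : Nat) :
    Nat → List Bool × List (Option Int × Int) × List Int → List (Option Int × Int)
  | 0, st => st.2.1
  | f + 1, (vis, res, fr) =>
    match fr with
    | [] => res
    | u0 :: rest =>
        let u := rest.foldl min u0                        -- u = min(frontier)
        let fr' := (u0 :: rest).erase u                   -- frontier.remove(u)
        let row := PySem.List.pyGetD G u []
        let new := (List.range V).filter
          (fun (v : Nat) => (PySem.List.pyGetD row (v : Int) 0 == 1) &&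
                    !(PySem.List.pyGetD vis (v : Int) false))
        let d := (PySem.List.pyGetD res u (none, 0)).2 + 1
        let vis' := new.foldl (fun (a : List Bool) (v : Nat) => PySem.List.pySetD a (v : Int) true) vis
        let res' := new.foldl
          (fun (a : List (Option Int × Int)) (v : Nat) => PySem.List.pySetD a (v : Int) ((some u : Option Int), d)) res
        bfsLoopB G V f (vis', res', fr' ++ new.map (fun (v : Nat) => (v : Int)))

def BFS_alt (G : List (List Int)) (s : Int) : List (Option Int × Int) :=
  let V := G.length
  let result := PySem.List.pySetD (List.replicate V ((some 0 : Option Int), (0 : Int))) s (none, 0)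
  let visited := PySem.List.pySetD (List.replicate V false) s true
  bfsLoopB G V (V + 1) (visited, result, [s])

-- ===== PRECONDITION & SPEC =====
-- Pre_ excludes matrices with a row shorter than len(G): there A raises IndexError whenever a
-- short row's vertex is reached from s, while A does still return on the (excluded) inputs whose
-- short rows are all unreachable — see the cite in claim.json.
def Pre_BFS (G : List (List Int)) (s : Int) : Prop :=
  PySem.Raise.InRange G.length s ∧ ∀ row ∈ G, G.length ≤ row.length
instance (G : List (List Int)) (s : Int) : Decidable (Pre_BFS G s) := by
  unfold Pre_BFS; infer_instance

def pvWitness_BFS : List (List Int) × Int := ([[0, 1], [1, 0]], 0)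

def Spec_BFS (G : List (List Int)) (s : Int) (out : List (Option Int × Int)) : Prop := out = BFS_alt G s
instance (G : List (List Int)) (s : Int) (out : List (Option Int × Int)) : Decidable (Spec_BFS G s out) := by unfold Spec_BFS; infer_instance

-- ===== CLAIM (what is proved, stated in full; the proofs are below) =====
def Claim_equal_BFS : Prop := ∀ (G : List (List Int)) (s : Int), Dom_BFS G s → Pre_BFS G s → Spec_BFS G s (BFS G s)

-- ===== LEMMAS AND PROOFS =====

theorem pySetD_natCast_set {α : Type} (xs : List α) (n : Nat) (x : α) :
    PySem.List.pySetD xs (n : Int) x = xs.set n x := by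
  simp only [PySem.List.pySetD, PySem.List.pySet?, PySem.List.pyIdx?]
  by_cases h : n < xs.length
  · simp [h]
  · simp [h]
    exact (List.set_eq_of_length_le (by omega)).symm

theorem pyIdx?_lt {n : Nat} {i : Int} {j : Nat} (h : PySem.List.pyIdx? n i = some j) :
    j < n := by
  simp only [PySem.List.pyIdx?] at h
  split_ifs at h <;> simp_all <;> omega

theorem pyGetD_idx {α : Type} {xs : List α} {i : Int} {j : Nat} (d : α)
    (h : PySem.List.pyIdx? xs.length i = some j) :
    PySem.List.pyGetD xs i d = xs.getD j d := by
  simp [PySem.List.pyGetD, PySem.List.pyGet?, h, List.getD_eq_getElem?_getD]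

theorem pySetD_idx {α : Type} {xs : List α} {i : Int} {j : Nat} (x : α)
    (h : PySem.List.pyIdx? xs.length i = some j) :
    PySem.List.pySetD xs i x = xs.set j x := by
  simp [PySem.List.pySetD, PySem.List.pySet?, h]

theorem getD_set_ne' {α : Type} (a : List α) (v w : Nat) (x : α) (d : α) (h : w ≠ v) :
    (a.set v x).getD w d = a.getD w d := by
  simp [List.getD_eq_getElem?_getD, List.getElem?_set_ne (by omega : v ≠ w)]

theorem getD_true_lt {a : List Bool} {j : Nat} (h : a.getD j false = true) :
    j < a.length := by
  by_cases hl : j < a.length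
  · exact hl
  · simp [List.getD_eq_getElem?_getD, List.getElem?_eq_none (by omega : a.length ≤ j)] at h

theorem length_foldl_pySetD {α : Type} (x : α) (l : List Nat) : ∀ (a : List α),
    (l.foldl (fun (a : List α) (v : Nat) => PySem.List.pySetD a (v : Int) x) a).length = a.length := by
  induction l with
  | nil => intro a; rfl
  | cons v rest ih =>
      intro a
      rw [List.foldl_cons, pySetD_natCast_set, ih, List.length_set]

theorem getD_foldl_setTrue_of_true (l : List Nat) : ∀ (a : List Bool) (j : Nat),
    a.getD j false = true →
    (l.foldl (fun (a : List Bool) (v : Nat) => PySem.List.pySetD a (v : Int) true) a).getD j false = true := by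
  induction l with
  | nil => intro a j h; exact h
  | cons v rest ih =>
      intro a j h
      rw [List.foldl_cons, pySetD_natCast_set]
      apply ih
      by_cases hjv : j = v
      · subst hjv
        have := getD_true_lt h
        simp [List.getD_eq_getElem?_getD, this]
      · rw [getD_set_ne' a v j true false hjv]; exact h

theorem getD_foldl_setTrue_mem (l : List Nat) : ∀ (a : List Bool) (v : Nat),
    v ∈ l → v < a.length →
    (l.foldl (fun (a : List Bool) (v : Nat) => PySem.List.pySetD a (v : Int) true) a).getD v false = true := by
  induction l with
  | nil => intro a v hv; simp at hv
  | cons w rest ih =>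
      intro a v hv hlt
      rw [List.foldl_cons, pySetD_natCast_set]
      by_cases hvw : v = w
      · subst hvw
        apply getD_foldl_setTrue_of_true
        simp [List.getD_eq_getElem?_getD, hlt]
      · rcases List.mem_cons.1 hv with h | h
        · exact absurd h hvw
        · exact ih (a.set w true) v h (by rw [List.length_set]; exact hlt)

theorem foldl_orderedInsert_perm (l : List Nat) : ∀ (q : List Int),
    (l.foldl (fun (q : List Int) (v : Nat) => List.orderedInsert (· ≤ ·) (v : Int) q) q).Perm
      (q ++ l.map (fun (v : Nat) => (v : Int))) := by
  induction l with
  | nil => intro q; simp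
  | cons v rest ih =>
      intro q
      simp only [List.foldl_cons, List.map_cons]
      refine (ih _).trans ?_
      refine (List.Perm.append_right _ (List.perm_orderedInsert _ _ _)).trans ?_
      exact List.perm_middle.symm

theorem foldl_orderedInsert_sorted (l : List Nat) : ∀ (q : List Int),
    q.Pairwise (· ≤ ·) →
    (l.foldl (fun (q : List Int) (v : Nat) => List.orderedInsert (· ≤ ·) (v : Int) q) q).Pairwise (· ≤ ·) := by
  induction l with
  | nil => intro q h; exact h
  | cons v rest ih =>
      intro q h
      exact ih _ (List.Pairwise.orderedInsert _ _ h)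

theorem inner_eq (row : List Int) (u : Int) (j : Nat) :
    ∀ (l : List Nat) (vis : List Bool) (res : List (Option Int × Int)) (q : List Int),
    l.Nodup →
    PySem.List.pyIdx? vis.length u = some j →
    vis.getD j false = true →
    res.length = vis.length →
    l.foldl (bfsStepA row u) (vis, res, q) =
      ((l.filter (fun (v : Nat) => (PySem.List.pyGetD row (v : Int) 0 == 1) &&
            !(PySem.List.pyGetD vis (v : Int) false))).foldl
          (fun (a : List Bool) (v : Nat) => PySem.List.pySetD a (v : Int) true) vis,
       (l.filter (fun (v : Nat) => (PySem.List.pyGetD row (v : Int) 0 == 1) &&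
            !(PySem.List.pyGetD vis (v : Int) false))).foldl
          (fun (a : List (Option Int × Int)) (v : Nat) => PySem.List.pySetD a (v : Int)
            ((some u : Option Int), (PySem.List.pyGetD res u (none, 0)).2 + 1)) res,
       (l.filter (fun (v : Nat) => (PySem.List.pyGetD row (v : Int) 0 == 1) &&
            !(PySem.List.pyGetD vis (v : Int) false))).foldl
          (fun (q : List Int) (v : Nat) => List.orderedInsert (· ≤ ·) (v : Int) q) q) := by
  intro l
  induction l with
  | nil => intro vis res q _ _ _ _; rfl
  | cons v rest ih =>
      intro vis res q hnd hj hvj hlen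
      have hvrest : v ∉ rest := (List.nodup_cons.1 hnd).1
      have hndr : rest.Nodup := (List.nodup_cons.1 hnd).2
      by_cases hc : ((PySem.List.pyGetD row (v : Int) 0 == 1) &&
          !(PySem.List.pyGetD vis (v : Int) false)) = true
      · -- v is discovered
        have hc' := hc
        simp only [Bool.and_eq_true, beq_iff_eq, Bool.not_eq_true'] at hc'
        have hr : PySem.List.pyGetD row (v : Int) 0 = 1 := hc'.1
        have hv : PySem.List.pyGetD vis (v : Int) false = false := hc'.2
        have hvgd : vis.getD v false = false := by simpa using hv
        have hvj' : v ≠ j := by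
          intro he; rw [he, hvj] at hvgd; cases hvgd
        have hstep : bfsStepA row u (vis, res, q) v =
            (vis.set v true,
             res.set v ((some u : Option Int), (PySem.List.pyGetD res u (none, 0)).2 + 1),
             List.orderedInsert (· ≤ ·) (v : Int) q) := by
          simp [bfsStepA, hr, hv]
        have hjlt := pyIdx?_lt hj
        have hgd_res : PySem.List.pyGetD res u (none, 0) = res.getD j (none, 0) :=
          pyGetD_idx _ (by rw [hlen]; exact hj)
        have hgd_res' : PySem.List.pyGetD
            (res.set v ((some u : Option Int), (PySem.List.pyGetD res u (none, 0)).2 + 1)) u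
            (none, 0) = PySem.List.pyGetD res u (none, 0) := by
          rw [pyGetD_idx _ (by rw [List.length_set, hlen]; exact hj), hgd_res]
          exact getD_set_ne' _ _ _ _ _ (Ne.symm hvj')
        have hfilt : ∀ w ∈ rest,
            ((PySem.List.pyGetD row (w : Int) 0 == 1) &&
              !(PySem.List.pyGetD (vis.set v true) (w : Int) false)) =
            ((PySem.List.pyGetD row (w : Int) 0 == 1) &&
              !(PySem.List.pyGetD vis (w : Int) false)) := by
          intro w hw
          have hwv : w ≠ v := fun he => hvrest (he ▸ hw)
          have : PySem.List.pyGetD (vis.set v true) (w : Int) false =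
              PySem.List.pyGetD vis (w : Int) false := by
            simp only [PySem.List.pyGetD_natCast]
            exact getD_set_ne' vis v w true false hwv
          rw [this]
        simp only [List.foldl_cons, hstep, List.filter_cons, hc]
        rw [ih (vis.set v true)
            (res.set v ((some u : Option Int), (PySem.List.pyGetD res u (none, 0)).2 + 1))
            (List.orderedInsert (· ≤ ·) (v : Int) q) hndr
            (by rw [List.length_set]; exact hj)
            (by rw [getD_set_ne' vis v j true false (Ne.symm hvj')]; exact hvj)
            (by rw [List.length_set, List.length_set]; exact hlen)]
        rw [List.filter_congr hfilt, hgd_res']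
        simp only [if_true, List.foldl_cons, pySetD_natCast_set]
      · -- v is skipped
        have hstep : bfsStepA row u (vis, res, q) v = (vis, res, q) := by
          simp only [bfsStepA]
          split_ifs with h1 h2
          · exfalso
            apply hc
            simp [h1, h2]
          · rfl
          · rfl
        simp only [List.foldl_cons, hstep, List.filter_cons, hc]
        simp only [Bool.false_eq_true, if_false]
        exact ih vis res q hndr hj hvj hlen

theorem loop_eq (G : List (List Int)) (V : Nat) :
    ∀ (f : Nat) (vis : List Bool) (res : List (Option Int × Int)) (qa fr : List Int),
    vis.length = V → res.length = V →
    qa.Pairwise (· ≤ ·) → qa.Perm fr →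
    (∀ u ∈ qa, ∃ j, PySem.List.pyIdx? V u = some j ∧ vis.getD j false = true) →
    bfsLoopA G V f (vis, res, qa) = bfsLoopB G V f (vis, res, fr) := by
  intro f
  induction f with
  | zero => intro vis res qa fr _ _ _ _ _; rfl
  | succ f ih =>
      intro vis res qa fr hlv hlr hsort hperm hinv
      cases qa with
      | nil =>
          have hfr : fr = [] := hperm.symm.eq_nil
          subst hfr; rfl
      | cons u q' =>
          cases fr with
          | nil => exact absurd hperm.eq_nil (by simp)
          | cons u0 rest =>
              have hmin : rest.foldl min u0 = u := by
                have h1 : (u0 :: rest).min? = some (rest.foldl min u0) := List.min?_cons'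
                have h2 : (u0 :: rest).min? = some u := by
                  rw [List.min?_eq_some_iff]
                  constructor
                  · exact hperm.mem_iff.1 (List.mem_cons_self)
                  · intro b hb
                    rcases List.mem_cons.1 (hperm.mem_iff.2 hb) with hbe | hbq
                    · exact le_of_eq hbe.symm
                    · exact (List.pairwise_cons.1 hsort).1 b hbq
                rw [h1] at h2
                exact Option.some.inj h2
              have herase : q'.Perm ((u0 :: rest).erase u) := by
                have := hperm.erase u
                rwa [List.erase_cons_head] at this
              obtain ⟨j, hj, hvj⟩ := hinv u List.mem_cons_self
              simp only [bfsLoopA, bfsLoopB, hmin]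
              rw [inner_eq (PySem.List.pyGetD G u []) u j (List.range V) vis res q'
                  List.nodup_range (by rw [hlv]; exact hj) hvj (by rw [hlr, hlv])]
              apply ih
              · rw [length_foldl_pySetD, hlv]
              · rw [length_foldl_pySetD, hlr]
              · exact foldl_orderedInsert_sorted _ _ (List.pairwise_cons.1 hsort).2
              · exact (foldl_orderedInsert_perm _ _).trans
                  (List.Perm.append_right _ herase)
              · intro w hw
                have hw' : w ∈ q' ++ (List.filter (fun (v : Nat) =>
                    (PySem.List.pyGetD (PySem.List.pyGetD G u []) (v : Int) 0 == 1) &&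
                    !(PySem.List.pyGetD vis (v : Int) false)) (List.range V)).map
                    (fun (v : Nat) => (v : Int)) :=
                  (foldl_orderedInsert_perm _ _).mem_iff.1 hw
                rcases List.mem_append.1 hw' with hq | hnew
                · obtain ⟨j', hj', hv'⟩ := hinv w (List.mem_cons_of_mem _ hq)
                  exact ⟨j', hj', getD_foldl_setTrue_of_true _ _ _ hv'⟩
                · obtain ⟨v, hvmem, hveq⟩ := List.mem_map.1 hnew
                  have hvV : v < V := List.mem_range.1 (List.mem_filter.1 hvmem).1
                  refine ⟨v, ?_, ?_⟩
                  · rw [← hveq]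
                    simp [PySem.List.pyIdx?]
                    omega
                  · exact getD_foldl_setTrue_mem _ _ _ hvmem (by rw [hlv]; exact hvV)

theorem InRange_pyIdx {n : Nat} {i : Int} (h : PySem.Raise.InRange n i) :
    ∃ j, PySem.List.pyIdx? n i = some j := by
  obtain ⟨h1, h2⟩ := h
  simp only [PySem.List.pyIdx?]
  split_ifs <;> simp_all

-- ===== VERDICT (by name: the statement is the Claim_ definition above) =====
theorem BFS_spec : Claim_equal_BFS := by
  intro G s _ hpre
  obtain ⟨hin, _⟩ := hpre
  obtain ⟨j, hj⟩ := InRange_pyIdx hin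
  have hjlt : j < G.length := pyIdx?_lt hj
  show BFS G s = BFS_alt G s
  simp only [BFS, BFS_alt]
  apply loop_eq
  · rw [pySetD_idx _ (by rw [List.length_replicate]; exact hj),
      List.length_set, List.length_replicate]
  · rw [pySetD_idx _ (by rw [List.length_replicate]; exact hj),
      List.length_set, List.length_replicate]
  · simp
  · exact List.Perm.refl _
  · intro u hu
    have hus : u = s := by simpa using hu
    subst hus
    refine ⟨j, hj, ?_⟩
    rw [pySetD_idx _ (by rw [List.length_replicate]; exact hj)]
    simp [List.getD_eq_getElem?_getD, List.length_replicate, hjlt]
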